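-- pv_equiv track=rewrite | github.com/akikuno/calcs | src/calcs.py | call_cs_long
-- ===== SOURCE A (Python) =====
-- def call_cs_long(ref: str, que: str):
--     cslong = []
--     append = cslong.append
--     _cs: str = ''
--     _previous: str = ''
--     for _ref, _que in zip(list(ref), list(que)):
--         # Match
--         if _ref == _que and _previous == "M":
--             _cs = _ref
--         elif _ref == _que and not _previous == "M":
--             _cs = "=" + _ref
--             _previous = "M"
--         # Deletion
--         elif _que == "D" and _previous == "D":
--             _cs = _ref.lower()
--         elif _que == "D" and not _previous == "D":
--             _cs = "-" + _ref.lower()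
--             _previous = "D"
--         # Insertion
--         elif _ref == "I" and _previous == "I":
--             _cs = _que.lower()
--         elif _ref == "I" and not _previous == "I":
--             _cs = "+" + _que.lower()
--             _previous = "I"
--         # Substitution
--         elif _ref != _que:
--             _cs = "*" + _ref.lower() + _que.lower()
--             _previous = "S"
--         append(_cs)
--     return "cs:Z:" + ''.join(cslong)
-- ===== SOURCE B (Python) =====
-- def call_cs_long(ref: str, que: str):
--     # classify-then-group: tag every position first, then emit one token per run
--     pairs = list(zip(ref, que))
--     def tag(p):
--         r, q = p
--         if r == q:
--             return 'M'
--         if q == 'D':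
--             return 'D'
--         if r == 'I':
--             return 'I'
--         return 'S'
--     tags = [tag(p) for p in pairs]
--     out = []
--     i, n = 0, len(pairs)
--     while i < n:
--         t = tags[i]
--         j = i + 1
--         while j < n and tags[j] == t:
--             j += 1
--         g = pairs[i:j]
--         if t == 'M':
--             out.append('=' + ''.join(r for r, _ in g))
--         elif t == 'D':
--             out.append('-' + ''.join(r.lower() for r, _ in g))
--         elif t == 'I':
--             out.append('+' + ''.join(q.lower() for _, q in g))
--         else:
--             out.extend('*' + r.lower() + q.lower() for r, q in g)
--         i = j
--     return 'cs:Z:' + ''.join(out)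
-- ===== Notes on version B (the rewrite author's own statement) =====
-- stated objective: alternative
-- what changed: Replaces A's stateful single pass (carrying _previous across iterations to decide prefixed vs bare emission) with a classify-then-group decomposition: tag every position first, then span maximal equal-tag runs and emit one token per run ('='/'-'/'+' runs joined, '*' substitutions emitted per element).
import Mathlib
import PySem

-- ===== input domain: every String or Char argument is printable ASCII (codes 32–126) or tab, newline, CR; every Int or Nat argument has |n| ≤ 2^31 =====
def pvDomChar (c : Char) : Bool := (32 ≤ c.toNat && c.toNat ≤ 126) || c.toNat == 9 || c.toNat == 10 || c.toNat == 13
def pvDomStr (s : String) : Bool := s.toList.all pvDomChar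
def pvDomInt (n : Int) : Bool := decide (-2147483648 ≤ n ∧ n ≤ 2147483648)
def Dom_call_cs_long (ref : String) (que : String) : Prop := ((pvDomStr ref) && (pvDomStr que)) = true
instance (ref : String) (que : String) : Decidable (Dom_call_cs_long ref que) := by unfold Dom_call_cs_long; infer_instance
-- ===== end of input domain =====

-- B replaces A's stateful `_previous` single pass by a classify-then-group decomposition
-- (tag every position, then emit one token per run); objective: alternative, same cost.

-- ===== PORT A =====
-- literal port of A's loop: state is (_cs, _previous), one output chunk appended per pair
def loopA : List (Char × Char) → List Char → List Char → List (List Char)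
  | [], _, _ => []
  | (r, q) :: rest, cs, prev =>
    if r = q ∧ prev = ['M'] then
      [r] :: loopA rest [r] prev
    else if r = q ∧ ¬ prev = ['M'] then
      ('=' :: [r]) :: loopA rest ('=' :: [r]) ['M']
    else if q = 'D' ∧ prev = ['D'] then
      [PySem.Chars.lowerChar r] :: loopA rest [PySem.Chars.lowerChar r] prev
    else if q = 'D' ∧ ¬ prev = ['D'] then
      ('-' :: [PySem.Chars.lowerChar r]) :: loopA rest ('-' :: [PySem.Chars.lowerChar r]) ['D']
    else if r = 'I' ∧ prev = ['I'] then
      [PySem.Chars.lowerChar q] :: loopA rest [PySem.Chars.lowerChar q] prev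
    else if r = 'I' ∧ ¬ prev = ['I'] then
      ('+' :: [PySem.Chars.lowerChar q]) :: loopA rest ('+' :: [PySem.Chars.lowerChar q]) ['I']
    else if ¬ r = q then
      ('*' :: [PySem.Chars.lowerChar r, PySem.Chars.lowerChar q]) ::
        loopA rest ('*' :: [PySem.Chars.lowerChar r, PySem.Chars.lowerChar q]) ['S']
    else
      cs :: loopA rest cs prev

def call_cs_long (ref : String) (que : String) : String :=
  String.ofList ("cs:Z:".toList ++ (loopA (ref.toList.zip que.toList) [] []).flatten)

-- ===== PORT B =====
-- per-position classification, in A's priority order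
def csTag (r : Char) (q : Char) : Char :=
  if r = q then 'M' else if q = 'D' then 'D' else if r = 'I' then 'I' else 'S'

-- token emitted for one maximal run of equally-tagged pairs
def emitRun (t : Char) (g : List (Char × Char)) : List Char :=
  if t = 'M' then '=' :: g.map (·.1)
  else if t = 'D' then '-' :: g.map (fun p => PySem.Chars.lowerChar p.1)
  else if t = 'I' then '+' :: g.map (fun p => PySem.Chars.lowerChar p.2)
  else (g.map (fun p => ['*', PySem.Chars.lowerChar p.1, PySem.Chars.lowerChar p.2])).flatten

-- group consecutive equal tags (Source B's inner while-j span) and emit each run's token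
def groupCS : List (Char × Char) → List Char
  | [] => []
  | p :: rest =>
    emitRun (csTag p.1 p.2) (p :: rest.takeWhile (fun x => csTag x.1 x.2 = csTag p.1 p.2))
      ++ groupCS (rest.dropWhile (fun x => csTag x.1 x.2 = csTag p.1 p.2))
termination_by ps => ps.length
decreasing_by
  simp only [List.length_cons]
  exact Nat.lt_succ_of_le (List.length_dropWhile_le _ _)

def call_cs_long_alt (ref : String) (que : String) : String :=
  String.ofList ("cs:Z:".toList ++ groupCS (ref.toList.zip que.toList))

-- ===== PRECONDITION & SPEC =====
def Spec_call_cs_long (ref : String) (que : String) (out : String) : Prop := out = call_cs_long_alt ref que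
instance (ref : String) (que : String) (out : String) : Decidable (Spec_call_cs_long ref que out) := by unfold Spec_call_cs_long; infer_instance

-- ===== CLAIM (what is proved, stated in full; the proofs are below) =====
def Claim_equal_call_cs_long : Prop := ∀ (ref : String) (que : String), Dom_call_cs_long ref que → Spec_call_cs_long ref que (call_cs_long ref que)

-- ===== LEMMAS AND PROOFS =====

-- clean tag-directed form of A's loop (proof-only helper)
def fullTok (t r q : Char) : List Char :=
  if t = 'M' then ['=', r]
  else if t = 'D' then ['-', PySem.Chars.lowerChar r]
  else if t = 'I' then ['+', PySem.Chars.lowerChar q]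
  else ['*', PySem.Chars.lowerChar r, PySem.Chars.lowerChar q]

def contTok (t r q : Char) : List Char :=
  if t = 'M' then [r]
  else if t = 'D' then [PySem.Chars.lowerChar r]
  else if t = 'I' then [PySem.Chars.lowerChar q]
  else ['*', PySem.Chars.lowerChar r, PySem.Chars.lowerChar q]

def loopA' : List (Char × Char) → List Char → List (List Char)
  | [], _ => []
  | (r, q) :: rest, prev =>
    if prev = [csTag r q] ∧ csTag r q ≠ 'S' then
      contTok (csTag r q) r q :: loopA' rest prev
    else
      fullTok (csTag r q) r q :: loopA' rest [csTag r q]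

theorem loopA_eq_loopA' (ps : List (Char × Char)) :
    ∀ cs prev, loopA ps cs prev = loopA' ps prev := by
  induction ps with
  | nil => intro cs prev; rfl
  | cons p rest ih =>
    obtain ⟨r, q⟩ := p
    intro cs prev
    by_cases hrq : r = q
    · subst hrq
      by_cases hp : prev = ['M'] <;>
        simp [loopA, loopA', csTag, contTok, fullTok, hp, ih]
    · by_cases hqD : q = 'D'
      · subst hqD
        by_cases hp : prev = ['D'] <;>
          simp [loopA, loopA', csTag, contTok, fullTok, hrq, hp, ih]
      · by_cases hrI : r = 'I'
        · subst hrI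
          by_cases hp : prev = ['I'] <;>
            simp [loopA, loopA', csTag, contTok, fullTok, hrq, hqD, hp, ih]
        · simp [loopA, loopA', csTag, fullTok, hrq, hqD, hrI, ih]

theorem flatten_map_singleton {α β : Type} (f : α → β) : ∀ l : List α,
    (l.map (fun x => [f x])).flatten = l.map f
  | [] => rfl
  | x :: l => by simp [flatten_map_singleton f l]

-- inside a run of tag t, every element emits contTok (for t = 'S', fullTok = contTok)
theorem loopA'_run (t : Char) (run : List (Char × Char)) :
    ∀ ys, (∀ p ∈ run, csTag p.1 p.2 = t) →
      loopA' (run ++ ys) [t] = run.map (fun p => contTok t p.1 p.2) ++ loopA' ys [t] := by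
  induction run with
  | nil => intro ys _; rfl
  | cons p rest ih =>
    intro ys h
    obtain ⟨r, q⟩ := p
    have ht : csTag r q = t := h (r, q) (by simp)
    have hrest : ∀ p ∈ rest, csTag p.1 p.2 = t := fun p hp => h p (by simp [hp])
    by_cases hS : t = 'S'
    · subst hS
      have hIH := ih ys hrest
      simp [loopA', ht, contTok, fullTok, hIH]
    · simp [loopA', ht, hS, ih ys hrest]

theorem flatten_loopA' : ∀ (n : ℕ) (ps : List (Char × Char)) (prev : List Char),
    ps.length ≤ n →
    (∀ p, ps.head? = some p → ¬ (prev = [csTag p.1 p.2] ∧ csTag p.1 p.2 ≠ 'S')) →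
    (loopA' ps prev).flatten = groupCS ps := by
  intro n
  induction n with
  | zero =>
    intro ps prev hn _
    have : ps = [] := List.eq_nil_of_length_eq_zero (Nat.le_zero.mp hn)
    subst this; simp [loopA', groupCS]
  | succ n ih =>
    intro ps prev hn hhd
    match ps with
    | [] => simp [loopA', groupCS]
    | (r, q) :: rest =>
      set t := csTag r q with htdef
      -- first element takes the "full" branch
      have hstep : loopA' ((r, q) :: rest) prev = fullTok t r q :: loopA' rest [t] := by
        simp only [loopA']
        rw [if_neg (hhd (r, q) rfl)]
      set run := rest.takeWhile (fun x => csTag x.1 x.2 = t) with hrun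
      set rest' := rest.dropWhile (fun x => csTag x.1 x.2 = t) with hrest'
      have hsplit : rest = run ++ rest' := (List.takeWhile_append_dropWhile).symm
      have hmem : ∀ p ∈ run, csTag p.1 p.2 = t := by
        intro p hp
        have := List.mem_takeWhile_imp hp
        exact of_decide_eq_true this
      have hlen' : rest'.length ≤ n := by
        have h1 : rest'.length ≤ rest.length := List.length_dropWhile_le _ _
        simp only [List.length_cons] at hn
        omega
      have hhd' : ∀ p, rest'.head? = some p → ¬ ([t] = [csTag p.1 p.2] ∧ csTag p.1 p.2 ≠ 'S') := by
        intro p hp hcon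
        obtain ⟨heq, _⟩ := hcon
        have h0 := List.head?_dropWhile_not (fun x => decide (csTag x.1 x.2 = t)) rest
        rw [← hrest', hp] at h0
        simp only [decide_eq_false_iff_not] at h0
        exact h0 (by simpa using heq.symm)
      have hIH : (loopA' rest' [t]).flatten = groupCS rest' := ih rest' [t] hlen' hhd'
      rw [hstep]
      conv_lhs => rw [hsplit]
      rw [List.flatten_cons, loopA'_run t run rest' hmem, List.flatten_append, hIH,
        ← List.append_assoc]
      rw [groupCS]
      simp only [← hrun, ← hrest', ← htdef]
      congr 1
      -- fullTok ++ flatten (map contTok run) = emitRun t ((r,q) :: run)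
      by_cases hM : t = 'M'
      · simp [fullTok, contTok, emitRun, hM, flatten_map_singleton]
      · by_cases hD : t = 'D'
        · simp [fullTok, contTok, emitRun, hD, flatten_map_singleton]
        · by_cases hI : t = 'I'
          · simp [fullTok, contTok, emitRun, hI, flatten_map_singleton]
          · simp [fullTok, contTok, emitRun, hM, hD, hI]

-- ===== VERDICT (by name: the statement is the Claim_ definition above) =====
theorem call_cs_long_spec : Claim_equal_call_cs_long := by
  intro ref que _
  unfold Spec_call_cs_long call_cs_long call_cs_long_alt
  rw [loopA_eq_loopA']
  rw [flatten_loopA' (ref.toList.zip que.toList).length _ [] le_rfl]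
  intro p _ hcon
  exact absurd hcon.1 (by simp)
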